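-- pv_equiv track=rewrite | github.com/kilolonion/excelmanus | excelmanus/window_perception/ingest.py | _detect_primary_key
-- ===== SOURCE A (Python) =====
-- from typing import Any
--
-- def _detect_primary_key(
--     existing_rows: list[dict[str, Any]],
--     incoming_rows: list[dict[str, Any]],
-- ) -> str:
--     candidates = ("id", "ID", "Id", "row_id", "key", "主键")
--     existing_keys = set().union(*(row.keys() for row in existing_rows if isinstance(row, dict)))
--     incoming_keys = set().union(*(row.keys() for row in incoming_rows if isinstance(row, dict)))
--     shared_keys = existing_keys & incoming_keys
--     for candidate in candidates:
--         if candidate in shared_keys: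
--             return candidate
--     return ""
-- ===== SOURCE B (Python) =====
-- def _detect_primary_key(
--     existing_rows: list,
--     incoming_rows: list,
-- ) -> str:
--     for candidate in ("id", "ID", "Id", "row_id", "key", "主键"):
--         if any(isinstance(row, dict) and candidate in row for row in existing_rows) and \
--            any(isinstance(row, dict) and candidate in row for row in incoming_rows):
--             return candidate
--     return ""
-- ===== Notes on version B (the rewrite author's own statement) =====
-- stated objective: simpler
-- what changed: B drops the set-union/intersection construction: it loops over the candidate tuple and returns the first candidate that some row of each list contains (any(...) per side), instead of building two key-sets and intersecting them.
import Mathlib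
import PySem

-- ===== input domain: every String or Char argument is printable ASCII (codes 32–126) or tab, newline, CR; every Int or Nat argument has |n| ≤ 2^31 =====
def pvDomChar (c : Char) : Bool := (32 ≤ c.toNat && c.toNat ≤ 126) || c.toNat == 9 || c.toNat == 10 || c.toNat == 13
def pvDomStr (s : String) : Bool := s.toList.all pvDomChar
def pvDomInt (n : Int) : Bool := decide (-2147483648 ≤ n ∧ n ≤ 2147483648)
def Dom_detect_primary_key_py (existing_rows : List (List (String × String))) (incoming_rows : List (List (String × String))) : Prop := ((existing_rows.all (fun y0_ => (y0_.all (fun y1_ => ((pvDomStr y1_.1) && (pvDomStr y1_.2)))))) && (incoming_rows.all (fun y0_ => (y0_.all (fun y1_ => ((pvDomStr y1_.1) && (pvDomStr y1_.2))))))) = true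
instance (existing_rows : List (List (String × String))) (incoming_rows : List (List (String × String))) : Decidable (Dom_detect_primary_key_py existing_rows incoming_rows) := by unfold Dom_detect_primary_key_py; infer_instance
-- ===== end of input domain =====

-- B replaces A's set-union/intersection construction by a direct scan: first candidate
-- contained in some row of each list (objective: simpler).

-- ===== PORT A =====
def pvCandidates : List String := ["id", "ID", "Id", "row_id", "key", "主键"]

-- set().union(*(row.keys() for row in rows)) : iterated union of each dict's key list
def pvAllKeys (rows : List (List (String × String))) : PySem.Set String :=
  rows.foldl (fun s row => PySem.Set.union s (PySem.Dict.keys (PySem.Dict.mk row))) PySem.Set.empty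

-- the final 'for candidate in candidates: if candidate in shared_keys: return candidate'
def pvFirstShared (shared : PySem.Set String) : List String → String
  | [] => ""
  | c :: cs => if PySem.Set.contains shared c then c else pvFirstShared shared cs

def detect_primary_key_py (existing_rows : List (List (String × String))) (incoming_rows : List (List (String × String))) : String :=
  let existing_keys := pvAllKeys existing_rows
  let incoming_keys := pvAllKeys incoming_rows
  let shared_keys := PySem.Set.inter existing_keys incoming_keys
  pvFirstShared shared_keys pvCandidates

-- ===== PORT B =====
-- any(isinstance(row, dict) and candidate in row for row in rows); rows are dicts under the type convention
def pvSideHas (rows : List (List (String × String))) (c : String) : Bool :=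
  rows.any (fun row => row.any (fun kv => kv.1 == c))

def detect_primary_key_py_alt (existing_rows : List (List (String × String))) (incoming_rows : List (List (String × String))) : String :=
  ((["id", "ID", "Id", "row_id", "key", "主键"].find?
      (fun c => pvSideHas existing_rows c && pvSideHas incoming_rows c)).getD "")

-- ===== PRECONDITION & SPEC =====
def Spec_detect_primary_key_py (existing_rows : List (List (String × String))) (incoming_rows : List (List (String × String))) (out : String) : Prop := out = detect_primary_key_py_alt existing_rows incoming_rows
instance (existing_rows : List (List (String × String))) (incoming_rows : List (List (String × String))) (out : String) : Decidable (Spec_detect_primary_key_py existing_rows incoming_rows out) := by unfold Spec_detect_primary_key_py; infer_instance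

-- ===== CLAIM (what is proved, stated in full; the proofs are below) =====
def Claim_equal_detect_primary_key_py : Prop := ∀ (existing_rows : List (List (String × String))) (incoming_rows : List (List (String × String))), Dom_detect_primary_key_py existing_rows incoming_rows → Spec_detect_primary_key_py existing_rows incoming_rows (detect_primary_key_py existing_rows incoming_rows)

-- ===== LEMMAS AND PROOFS =====

theorem mem_pvAllKeys (rows : List (List (String × String))) (c : String) :
    c ∈ pvAllKeys rows ↔ ∃ row ∈ rows, c ∈ (PySem.Dict.keys (PySem.Dict.mk row)) := by
  unfold pvAllKeys
  induction rows using List.reverseRecOn with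
  | nil => simp [PySem.Set.empty]
  | append_singleton xs x ih =>
    rw [List.foldl_append, List.foldl_cons, List.foldl_nil, PySem.Set.mem_union, ih]
    simp [PySem.Dict.keys_mk, List.mem_map]
    aesop

theorem pvSideHas_iff (rows : List (List (String × String))) (c : String) :
    pvSideHas rows c = true ↔ c ∈ pvAllKeys rows := by
  rw [mem_pvAllKeys]
  unfold pvSideHas
  simp only [List.any_eq_true, PySem.Dict.keys_mk, List.mem_map, beq_iff_eq]

theorem shared_iff (e i : List (List (String × String))) (c : String) :
    PySem.Set.contains (PySem.Set.inter (pvAllKeys e) (pvAllKeys i)) c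
      = (pvSideHas e c && pvSideHas i c) := by
  rw [Bool.eq_iff_iff, Bool.and_eq_true, PySem.Set.contains_iff, PySem.Set.mem_inter,
    pvSideHas_iff, pvSideHas_iff]

theorem firstShared_eq (shared : PySem.Set String) (p : String → Bool)
    (cs : List String) (h : ∀ c ∈ cs, PySem.Set.contains shared c = p c) :
    pvFirstShared shared cs = (cs.find? p).getD "" := by
  induction cs with
  | nil => rfl
  | cons c cs ih =>
    simp only [pvFirstShared, List.find?]
    rw [h c (by simp)]
    rcases hp : p c with _ | _
    · simp [ih (fun x hx => h x (by simp [hx]))]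
    · simp

-- ===== VERDICT (by name: the statement is the Claim_ definition above) =====
theorem detect_primary_key_py_spec : Claim_equal_detect_primary_key_py := by
  intro e i _
  show detect_primary_key_py e i = detect_primary_key_py_alt e i
  unfold detect_primary_key_py detect_primary_key_py_alt pvCandidates
  exact firstShared_eq _ _ _ (fun c _ => shared_iff e i c)
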